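-- pv_equiv track=rewrite | github.com/TaiLinhares/named-after-men | src/utils.py | text_concat
-- ===== SOURCE A (Python) =====
-- def text_concat(names, tag_o="", tag_c="", lim=0):
--     """Concatenate list of names and apply conjunction
--         names: list, strings to be concatenated.
--         tag_o: str, opening html tag.
--         tag_c: str, closing html tag.
--         lim: int, maximum items to be concatenated.
--         returns concatenated list of names"""
--
--     text = ""
--
--     if lim > 0 and lim <= len(names):
--         names = names[:lim]
--     else:
--         lim = len(names)
--
--     for i, m in enumerate(names):
--         if lim == 1:
--             text += tag_o + m + tag_c
--
--         elif (lim - 1) == i: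
--             text += "and " + tag_o + m + tag_c
--
--         else:
--             text += tag_o + m + tag_c + ", "
--
--     return text
-- ===== SOURCE B (Python) =====
-- def text_concat(names, tag_o="", tag_c="", lim=0):
--     """Concatenate list of names and apply conjunction (join-based rewrite)."""
--     if 0 < lim <= len(names):
--         names = names[:lim]
--     wrapped = [tag_o + m + tag_c for m in names]
--     if len(wrapped) <= 1:
--         return "".join(wrapped)
--     return ", ".join(wrapped[:-1]) + ", and " + wrapped[-1]
-- ===== Notes on version B (the rewrite author's own statement) =====
-- stated objective: simpler
-- what changed: Replaces the indexed loop with its three per-element branches by wrapping every name once and assembling the result with ', '.join of all but the last item plus ', and ' plus the last item (empty/singleton lists fall out of ''.join).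
import Mathlib
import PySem

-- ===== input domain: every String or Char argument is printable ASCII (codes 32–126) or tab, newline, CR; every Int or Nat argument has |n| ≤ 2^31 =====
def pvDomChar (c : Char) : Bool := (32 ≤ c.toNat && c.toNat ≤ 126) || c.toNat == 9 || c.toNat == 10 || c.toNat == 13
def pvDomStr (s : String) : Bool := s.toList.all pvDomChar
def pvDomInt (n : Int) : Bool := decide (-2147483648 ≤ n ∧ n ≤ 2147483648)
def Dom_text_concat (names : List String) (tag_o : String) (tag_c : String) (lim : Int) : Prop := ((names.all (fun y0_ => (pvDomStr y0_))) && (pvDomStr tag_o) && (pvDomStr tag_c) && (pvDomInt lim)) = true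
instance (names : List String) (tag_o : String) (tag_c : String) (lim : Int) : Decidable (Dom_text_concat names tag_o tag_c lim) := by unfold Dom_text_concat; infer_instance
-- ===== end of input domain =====

-- B replaces A's indexed loop with three branches by wrap-every-name + join-all-but-last + ", and " + last (simpler decomposition, same cost).

-- ===== PORT A =====
def text_concat (names : List String) (tag_o : String) (tag_c : String) (lim : Int) : String :=
  let names' := if 0 < lim ∧ lim ≤ (names.length : Int) then PySem.List.slice names none (some lim) else names
  let lim' : Int := if 0 < lim ∧ lim ≤ (names.length : Int) then lim else (names.length : Int)
  String.ofList ((PySem.List.enumerate names' 0).foldl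
    (fun text im =>
      if lim' = 1 then text ++ tag_o.toList ++ im.2.toList ++ tag_c.toList
      else if lim' - 1 = im.1 then text ++ "and ".toList ++ tag_o.toList ++ im.2.toList ++ tag_c.toList
      else text ++ tag_o.toList ++ im.2.toList ++ tag_c.toList ++ ", ".toList) [])

-- ===== PORT B =====
def text_concat_alt (names : List String) (tag_o : String) (tag_c : String) (lim : Int) : String :=
  let names' := if 0 < lim ∧ lim ≤ (names.length : Int) then PySem.List.slice names none (some lim) else names
  let wrapped := names'.map (fun m => tag_o.toList ++ m.toList ++ tag_c.toList)
  if wrapped.length ≤ 1 then String.ofList (PySem.Chars.join [] wrapped)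
  else String.ofList (PySem.Chars.join ", ".toList wrapped.dropLast ++ ", and ".toList ++ PySem.List.pyGetD wrapped (-1) [])

-- ===== PRECONDITION & SPEC =====
def Spec_text_concat (names : List String) (tag_o : String) (tag_c : String) (lim : Int) (out : String) : Prop := out = text_concat_alt names tag_o tag_c lim
instance (names : List String) (tag_o : String) (tag_c : String) (lim : Int) (out : String) : Decidable (Spec_text_concat names tag_o tag_c lim out) := by unfold Spec_text_concat; infer_instance

-- ===== CLAIM (what is proved, stated in full; the proofs are below) =====
def Claim_equal_text_concat : Prop := ∀ (names : List String) (tag_o : String) (tag_c : String) (lim : Int), Dom_text_concat names tag_o tag_c lim → Spec_text_concat names tag_o tag_c lim (text_concat names tag_o tag_c lim)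

-- ===== LEMMAS AND PROOFS =====

-- nonempty list: concatenating "piece ++ sep" for every piece is join-with-sep plus a trailing sep
lemma flatten_map_append_sep {α : Type} (f : α → List Char) (sep : List Char) :
    ∀ (ys : List α), ys ≠ [] →
      (ys.map (fun m => f m ++ sep)).flatten = PySem.Chars.join sep (ys.map f) ++ sep := by
  intro ys
  induction ys with
  | nil => intro h; exact absurd rfl h
  | cons x xs ih =>
    intro _
    cases xs with
    | nil => simp [PySem.Chars.join_singleton]
    | cons y rest =>
      have ih' := ih (by simp)
      simp only [List.map_cons, List.flatten_cons] at ih' ⊢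
      rw [ih', PySem.Chars.join_cons_cons]
      simp [List.append_assoc]

-- A's loop over indices all strictly below lim-1 (with lim ≠ 1) appends "wrapped ++ ', '" per element
lemma loopA_mid (o c : List Char) (n : Int) (hn : n ≠ 1) :
    ∀ (l : List String), ∀ (s : Int) (acc : List Char), s + (l.length : Int) ≤ n - 1 →
      (PySem.List.enumerate l s).foldl
        (fun text im =>
          if n = 1 then text ++ o ++ im.2.toList ++ c
          else if n - 1 = im.1 then text ++ "and ".toList ++ o ++ im.2.toList ++ c
          else text ++ o ++ im.2.toList ++ c ++ ", ".toList) acc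
      = acc ++ (l.map (fun m => o ++ m.toList ++ c ++ ", ".toList)).flatten := by
  intro l
  induction l with
  | nil => intro s acc _; simp [PySem.List.enumerate_nil]
  | cons x xs ih =>
    intro s acc h
    rw [PySem.List.enumerate_cons]
    simp only [List.length_cons] at h
    push_cast at h
    rw [List.foldl_cons, ih (s + 1) _ (by omega)]
    simp only [if_neg hn, if_neg (show ¬ (n - 1 = s) by omega)]
    simp [List.append_assoc]

-- the heart: A's loop with lim = length equals B's join-based assembly, for any element list
lemma core_eq (o c : List Char) (l : List String) :
    (PySem.List.enumerate l 0).foldl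
      (fun text im =>
        if (l.length : Int) = 1 then text ++ o ++ im.2.toList ++ c
        else if (l.length : Int) - 1 = im.1 then text ++ "and ".toList ++ o ++ im.2.toList ++ c
        else text ++ o ++ im.2.toList ++ c ++ ", ".toList) []
    = (if (l.map (fun m => o ++ m.toList ++ c)).length ≤ 1 then
         PySem.Chars.join [] (l.map (fun m => o ++ m.toList ++ c))
       else
         PySem.Chars.join ", ".toList (l.map (fun m => o ++ m.toList ++ c)).dropLast
           ++ ", and ".toList
           ++ PySem.List.pyGetD (l.map (fun m => o ++ m.toList ++ c)) (-1) []) := by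
  match l with
  | [] => simp [PySem.List.enumerate_nil, PySem.Chars.join_nil]
  | [x] =>
    simp [PySem.List.enumerate_cons, PySem.List.enumerate_nil, PySem.Chars.join_singleton]
  | x :: y :: rest =>
    obtain ⟨ys, z, hl, hys⟩ : ∃ ys z, x :: y :: rest = ys ++ [z] ∧ ys ≠ [] := by
      refine ⟨(x :: y :: rest).dropLast, (x :: y :: rest).getLast (by simp), ?_, by simp⟩
      exact (List.dropLast_append_getLast (by simp)).symm
    rw [hl]
    have h1 : 0 < ys.length := List.length_pos_of_ne_nil hys
    have hne1 : (((ys ++ [z]).length : Int)) ≠ 1 := by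
      simp only [List.length_append, List.length_cons, List.length_nil]; push_cast; omega
    rw [PySem.List.enumerate_append, List.foldl_append]
    rw [loopA_mid o c _ hne1 ys 0 []
      (by simp only [List.length_append, List.length_cons, List.length_nil]; push_cast; omega)]
    simp only [PySem.List.enumerate_cons, PySem.List.enumerate_nil, List.foldl_cons, List.foldl_nil]
    rw [if_neg hne1,
      if_pos (show (((ys ++ [z]).length : Int) - 1 = 0 + (ys.length : Int)) by
        simp only [List.length_append, List.length_cons, List.length_nil]; push_cast; ring)]
    rw [if_neg (show ¬ (((ys ++ [z]).map (fun m => o ++ m.toList ++ c)).length ≤ 1) by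
      simp only [List.length_map, List.length_append, List.length_cons, List.length_nil]; omega)]
    rw [List.map_append, List.map_singleton, PySem.List.pyGetD_neg_one_append_singleton,
      List.dropLast_concat]
    rw [flatten_map_append_sep (fun m => o ++ m.toList ++ c) ", ".toList ys hys]
    have hsep : ", ".toList ++ "and ".toList = ", and ".toList := by decide
    simp only [List.nil_append, List.append_assoc, hsep]

theorem text_concat_spec : Claim_equal_text_concat := by
  intro names tag_o tag_c lim _
  unfold Spec_text_concat text_concat text_concat_alt
  rw [← apply_ite String.ofList]
  by_cases h : 0 < lim ∧ lim ≤ (names.length : Int)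
  · simp only [if_pos h]
    rw [PySem.List.slice_to names (le_of_lt h.1)]
    have hlen : ((names.take lim.toNat).length : Int) = lim := by
      simp only [List.length_take]
      have hle : lim.toNat ≤ names.length := by omega
      rw [min_eq_left hle]; omega
    have hc := core_eq tag_o.toList tag_c.toList (names.take lim.toNat)
    rw [hlen] at hc
    exact congrArg String.ofList hc
  · simp only [if_neg h]
    exact congrArg String.ofList (core_eq tag_o.toList tag_c.toList names)
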